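-- pv_equiv track=rewrite | github.com/Cloudy17g35/Codewars-solutions | Larger_Product_or_Sum.py | sum_or_product
-- ===== SOURCE A (Python) =====
-- def sum_or_product(array, n):
--     array = sorted(array, reverse=True)
--     product = 1
--
--     for element in array[-n:]:
--
--         product *= element
--
--     array_sum = sum(array[:n])
--
--     if array_sum > product:
--         return 'sum'
--     elif array_sum < product:
--         return 'product'
--     else:
--         return 'same'
-- ===== SOURCE B (Python) =====
-- def _insert_capped(buf, x, n, desc):
--     # binary search for x's position in the sorted buffer, insert, keep at most n elements
--     lo, hi = 0, len(buf)
--     while lo < hi: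
--         mid = (lo + hi) // 2
--         if (buf[mid] > x) if desc else (buf[mid] < x):
--             lo = mid + 1
--         else:
--             hi = mid
--     buf.insert(lo, x)
--     if len(buf) > n:
--         buf.pop()
--     return buf
--
--
-- def sum_or_product(array, n):
--     top, bot = [], []
--     for x in array:
--         top = _insert_capped(top, x, n, True)
--         bot = _insert_capped(bot, x, n, False)
--     s = sum(top)
--     p = 1
--     for v in bot:
--         p *= v
--     return 'sum' if s > p else 'product' if s < p else 'same'
-- ===== Notes on version B (the rewrite author's own statement) =====
-- stated objective: alternative
-- what changed: B replaces A's full descending sort plus slicing by a single left-to-right pass that maintains two capped sorted buffers (the n largest and the n smallest seen so far, inserted by binary search), summing one and multiplying the other at the end.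
-- outside the precondition, e.g. on sum_or_product([1, 2], -1): A returns 'sum', B returns 'product'; on sum_or_product([2, 3], 0): A returns 'product', B returns 'product'
import Mathlib
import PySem

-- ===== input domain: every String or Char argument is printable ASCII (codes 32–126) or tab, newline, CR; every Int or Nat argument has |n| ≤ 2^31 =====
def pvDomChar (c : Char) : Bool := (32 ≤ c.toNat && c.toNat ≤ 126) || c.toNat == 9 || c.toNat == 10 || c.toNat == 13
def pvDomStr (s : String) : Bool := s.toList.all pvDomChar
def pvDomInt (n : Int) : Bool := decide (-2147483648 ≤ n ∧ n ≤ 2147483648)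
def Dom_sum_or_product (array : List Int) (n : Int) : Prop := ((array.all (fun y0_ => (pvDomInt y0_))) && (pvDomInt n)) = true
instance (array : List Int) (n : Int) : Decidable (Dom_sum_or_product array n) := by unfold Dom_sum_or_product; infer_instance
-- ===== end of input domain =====

-- B replaces A's full descending sort plus slicing by one left-to-right pass keeping two capped
-- sorted buffers (the n largest and the n smallest seen so far, binary-search insertion);
-- objective: alternative algorithm.


-- ===== PORT A =====
def sum_or_product (array : List Int) (n : Int) : String :=
  let arr := PySem.List.sorted array (fun x => x) true
  let product := (PySem.List.slice arr (some (-n)) none).foldl (fun p e => p * e) 1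
  let array_sum := (PySem.List.slice arr none (some n)).sum
  if array_sum > product then "sum"
  else if array_sum < product then "product"
  else "same"

-- ===== PORT B =====
-- "(buf[mid] > x) if desc else (buf[mid] < x)" of Source B's _insert_capped
def pvCond (d : Bool) (b x : Int) : Bool := if d then b > x else b < x

-- the while-loop binary search of Source B's _insert_capped (lo, hi as in the Python; buf[mid] is
-- always in range when the loop body runs, so getD's default is never read)
def pvBisect (buf : List Int) (x : Int) (d : Bool) (lo hi : Nat) : Nat :=
  if lo < hi then
    let mid := (lo + hi) / 2
    if pvCond d (buf.getD mid 0) x then pvBisect buf x d (mid + 1) hi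
    else pvBisect buf x d lo mid
  else lo
termination_by hi - lo
decreasing_by all_goals omega

-- buf.insert(i, x) followed by "if len(buf) > n: buf.pop()"; take/cons/drop is buf.insert(i, x)
-- exactly, since 0 ≤ i ≤ len(buf) here (PySem.List.insert_natCast)
def pvInsCapped (buf : List Int) (x : Int) (n : Int) (d : Bool) : List Int :=
  let i := pvBisect buf x d 0 buf.length
  let ins := buf.take i ++ x :: buf.drop i
  if (ins.length : Int) > n then ins.dropLast else ins

def sum_or_product_alt (array : List Int) (n : Int) : String :=
  let st := array.foldl
    (fun (st : List Int × List Int) x =>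
      (pvInsCapped st.1 x n true, pvInsCapped st.2 x n false)) ([], [])
  let s := st.1.sum
  let p := st.2.foldl (fun p v => p * v) 1
  if s > p then "sum"
  else if s < p then "product"
  else "same"

-- ===== PRECONDITION & SPEC =====
-- Pre_ restricts to the kata's natural domain n >= 1 (a positive count of elements): for n <= 0 A's
-- slice array[-n:] wraps around (n = 0 selects the WHOLE array, n < 0 drops leading elements), an
-- accident of Python slice arithmetic outside the task's domain, and B's capped buffers are empty there.
def Pre_sum_or_product (array : List Int) (n : Int) : Prop := 1 ≤ n
instance (array : List Int) (n : Int) : Decidable (Pre_sum_or_product array n) := by unfold Pre_sum_or_product; infer_instance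
def pvWitness_sum_or_product : List Int × Int := ([3, 1, 2], 2)

def Spec_sum_or_product (array : List Int) (n : Int) (out : String) : Prop := out = sum_or_product_alt array n
instance (array : List Int) (n : Int) (out : String) : Decidable (Spec_sum_or_product array n out) := by unfold Spec_sum_or_product; infer_instance

-- ===== CLAIM (what is proved, stated in full; the proofs are below) =====
def Claim_equal_sum_or_product : Prop := ∀ (array : List Int) (n : Int), Dom_sum_or_product array n → Pre_sum_or_product array n → Spec_sum_or_product array n (sum_or_product array n)

-- ===== LEMMAS AND PROOFS =====

-- proof device: linear-scan insertion; pvInsCapped is its length-capped version on sorted buffers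
def pvIns (buf : List Int) (x : Int) (d : Bool) : List Int :=
  match buf with
  | [] => [x]
  | b :: t => if pvCond d b x then b :: pvIns t x d else x :: b :: t

theorem pvIns_length (s : List Int) (x : Int) (d : Bool) :
    (pvIns s x d).length = s.length + 1 := by
  induction s with
  | nil => rfl
  | cons b t ih => simp only [pvIns]; split <;> simp [ih]

theorem pvIns_perm (s : List Int) (x : Int) (d : Bool) :
    (pvIns s x d).Perm (x :: s) := by
  induction s with
  | nil => exact List.Perm.refl _
  | cons b t ih =>
    simp only [pvIns]; split
    · exact (ih.cons b).trans (List.Perm.swap x b t)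
    · exact List.Perm.refl _

theorem pvIns_take (s : List Int) (k : Nat) (x : Int) (d : Bool) :
    (pvIns (s.take k) x d).take k = (pvIns s x d).take k := by
  induction s generalizing k with
  | nil => simp
  | cons b t ih =>
    cases k with
    | zero => simp
    | succ j =>
      simp only [List.take_succ_cons, pvIns]
      split
      · simp [ih j]
      · cases j with
        | zero => simp
        | succ i => simp [List.take_take]

-- the order kept in a buffer: non-increasing for desc = true, non-decreasing for desc = false
def pvRel (d : Bool) (a b : Int) : Prop := if d then b ≤ a else a ≤ b

theorem pvCond_mono (d : Bool) (x a b : Int) (hab : pvRel d a b)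
    (h : pvCond d b x = true) : pvCond d a x = true := by
  cases d <;> simp [pvCond, pvRel] at * <;> omega

theorem pvIns_pairwise (s : List Int) (x : Int) (d : Bool)
    (h : s.Pairwise (pvRel d)) : (pvIns s x d).Pairwise (pvRel d) := by
  induction s with
  | nil => simp [pvIns, List.pairwise_cons]
  | cons b t ih =>
    rcases List.pairwise_cons.mp h with ⟨hb, ht⟩
    simp only [pvIns]
    split
    · rename_i hbx
      refine List.pairwise_cons.mpr ⟨?_, ih ht⟩
      intro y hy
      rcases List.mem_cons.mp ((pvIns_perm t x d).mem_iff.mp hy) with h' | h'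
      · subst h'; cases d <;> simp [pvCond, pvRel] at * <;> omega
      · exact hb y h'
    · rename_i hbx
      refine List.pairwise_cons.mpr ⟨?_, h⟩
      intro y hy
      rcases List.mem_cons.mp hy with h' | h'
      · subst h'; cases d <;> simp [pvCond, pvRel] at * <;> omega
      · have := hb y h'; cases d <;> simp [pvCond, pvRel] at * <;> omega

-- the uncapped insertion fold: insertion sort in the buffer's order
def pvSortFold (l : List Int) (d : Bool) : List Int :=
  l.foldl (fun acc x => pvIns acc x d) []

theorem pvFold_perm_aux (d : Bool) (l : List Int) :
    ∀ acc : List Int, (l.foldl (fun acc x => pvIns acc x d) acc).Perm (acc ++ l) := by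
  induction l with
  | nil => intro acc; simp
  | cons a t ih =>
    intro acc
    have h1 := ih (pvIns acc a d)
    have h2 : (pvIns acc a d ++ t).Perm (acc ++ a :: t) :=
      ((pvIns_perm acc a d).append_right t).trans List.perm_middle.symm
    simpa using h1.trans h2

theorem pvSortFold_perm (l : List Int) (d : Bool) : (pvSortFold l d).Perm l := by
  simpa using pvFold_perm_aux d l []

theorem pvSortFold_pairwise (l : List Int) (d : Bool) :
    (pvSortFold l d).Pairwise (pvRel d) := by
  suffices h : ∀ acc : List Int, acc.Pairwise (pvRel d) →
      (l.foldl (fun acc x => pvIns acc x d) acc).Pairwise (pvRel d) by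
    exact h [] (by simp)
  induction l with
  | nil => intro acc hacc; simpa using hacc
  | cons a t ih => intro acc hacc; exact ih _ (pvIns_pairwise acc a d hacc)

theorem pvSortFold_eq_sorted_desc (l : List Int) :
    pvSortFold l true = PySem.List.sorted l (fun x => x) true := by
  refine List.Perm.eq_of_pairwise (le := pvRel true) (fun a b _ _ h h' => by
      simp [pvRel] at h h'; omega)
    (pvSortFold_pairwise l true) ?_ ?_
  · have := PySem.List.sorted_pairwise_rev l (fun x => x)
    exact this.imp (fun h => by simpa [pvRel] using h)
  · exact (pvSortFold_perm l true).trans (PySem.List.sorted_perm l _ true).symm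

theorem pvSortFold_eq_sorted_asc (l : List Int) :
    pvSortFold l false = PySem.List.sorted l (fun x => x) false := by
  refine List.Perm.eq_of_pairwise (le := pvRel false) (fun a b _ _ h h' => by
      simp [pvRel] at h h'; omega)
    (pvSortFold_pairwise l false) ?_ ?_
  · have := PySem.List.sorted_pairwise l (fun x => x)
    exact this.imp (fun h => by simpa [pvRel] using h)
  · exact (pvSortFold_perm l false).trans (PySem.List.sorted_perm l _ false).symm

-- the binary search finds a frontier of the (monotone) predicate pvCond
theorem pvBisect_spec (buf : List Int) (x : Int) (d : Bool)
    (hmono : ∀ i j : Nat, i ≤ j → j < buf.length →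
      pvCond d (buf.getD j 0) x = true → pvCond d (buf.getD i 0) x = true) :
    ∀ (fuel lo hi : Nat), hi - lo ≤ fuel → lo ≤ hi → hi ≤ buf.length →
    (∀ j, j < lo → pvCond d (buf.getD j 0) x = true) →
    (∀ j, hi ≤ j → j < buf.length → pvCond d (buf.getD j 0) x = false) →
    lo ≤ pvBisect buf x d lo hi ∧ pvBisect buf x d lo hi ≤ hi ∧
    (∀ j, j < pvBisect buf x d lo hi → pvCond d (buf.getD j 0) x = true) ∧
    (∀ j, pvBisect buf x d lo hi ≤ j → j < buf.length → pvCond d (buf.getD j 0) x = false) := by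
  intro fuel
  induction fuel with
  | zero =>
    intro lo hi hf hlh hhl hlo hhi
    have hlh' : lo = hi := by omega
    rw [pvBisect, if_neg (by omega)]
    exact ⟨le_refl _, by omega, hlo, fun j hj hjl => hhi j (by omega) hjl⟩
  | succ f ih =>
    intro lo hi hf hlh hhl hlo hhi
    rw [pvBisect]
    by_cases h : lo < hi
    · rw [if_pos h]
      set mid := (lo + hi) / 2 with hmid
      have hmlo : lo ≤ mid := by omega
      have hmhi : mid < hi := by omega
      by_cases hc : pvCond d (buf.getD mid 0) x = true
      · rw [if_pos hc]
        have := ih (mid + 1) hi (by omega) (by omega) hhl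
          (fun j hj => by
            rcases Nat.lt_succ_iff_lt_or_eq.mp hj with h' | h'
            · exact hmono j mid (by omega) (by omega) hc
            · subst h'; exact hc)
          hhi
        exact ⟨by omega, this.2.1, this.2.2.1, this.2.2.2⟩
      · rw [if_neg hc]
        have := ih lo mid (by omega) (by omega) (by omega) hlo
          (fun j hj hjl => by
            by_cases hjm : j = mid
            · subst hjm; simpa using hc
            · have : pvCond d (buf.getD j 0) x ≠ true := fun ht =>
                hc (hmono mid j (by omega) hjl ht)
              simpa using this)
        exact ⟨this.1, by omega, this.2.2.1, this.2.2.2⟩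
    · rw [if_neg h]
      have hlh' : lo = hi := by omega
      exact ⟨le_refl _, by omega, hlo, fun j hj hjl => hhi j (by omega) hjl⟩

-- inserting at a frontier position of pvCond is linear-scan insertion
theorem pvIns_eq_insertAt (buf : List Int) (x : Int) (d : Bool) :
    ∀ r : Nat, r ≤ buf.length →
    (∀ j, j < r → pvCond d (buf.getD j 0) x = true) →
    (∀ j, r ≤ j → j < buf.length → pvCond d (buf.getD j 0) x = false) →
    buf.take r ++ x :: buf.drop r = pvIns buf x d := by
  induction buf with
  | nil =>
    intro r hr _ _
    have : r = 0 := by simpa using hr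
    subst this; rfl
  | cons b t ih =>
    intro r hr hP hnP
    cases r with
    | zero =>
      have h0 : pvCond d b x = false := by simpa using hnP 0 (by omega) (by simp)
      simp [pvIns, h0]
    | succ r' =>
      have hb : pvCond d b x = true := by simpa using hP 0 (by omega)
      have := ih r' (by simpa using hr)
        (fun j hj => by simpa using hP (j + 1) (by omega))
        (fun j hj hjl => by simpa using hnP (j + 1) (by omega) (by simpa using hjl))
      simp [pvIns, hb, List.take_succ_cons, List.drop_succ_cons, this]

-- on a sorted buffer, the capped binary-search insertion is the capped linear-scan insertion
theorem pvInsCapped_eq_of_sorted (buf : List Int) (x : Int) (n : Int) (d : Bool)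
    (hs : buf.Pairwise (pvRel d)) :
    pvInsCapped buf x n d =
      if ((pvIns buf x d).length : Int) > n then (pvIns buf x d).dropLast else pvIns buf x d := by
  have hmono : ∀ i j : Nat, i ≤ j → j < buf.length →
      pvCond d (buf.getD j 0) x = true → pvCond d (buf.getD i 0) x = true := by
    intro i j hij hjl ht
    by_cases hie : i = j
    · subst hie; exact ht
    · have hrel : pvRel d buf[i] buf[j] :=
        (List.pairwise_iff_getElem.mp hs) i j (by omega) hjl (by omega)
      rw [List.getD_eq_getElem buf 0 (by omega)] at *
      exact pvCond_mono d x _ _ hrel ht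
  have hspec := pvBisect_spec buf x d hmono (buf.length - 0) 0 buf.length (by omega)
    (by omega) (le_refl _) (by omega) (by omega)
  have hins : buf.take (pvBisect buf x d 0 buf.length) ++ x ::
      buf.drop (pvBisect buf x d 0 buf.length) = pvIns buf x d :=
    pvIns_eq_insertAt buf x d _ hspec.2.1 hspec.2.2.1 hspec.2.2.2
  show (if ((buf.take (pvBisect buf x d 0 buf.length) ++ x ::
        buf.drop (pvBisect buf x d 0 buf.length)).length : Int) > n then _ else _) = _
  rw [hins]

theorem pvSortFold_append_singleton (l : List Int) (x : Int) (d : Bool) :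
    pvSortFold (l ++ [x]) d = pvIns (pvSortFold l d) x d := by
  simp [pvSortFold, List.foldl_append]

theorem pvFold_capped (l : List Int) (n : Int) (hn : 1 ≤ n) (d : Bool) :
    l.foldl (fun acc x => pvInsCapped acc x n d) [] = (pvSortFold l d).take n.toNat := by
  induction l using List.reverseRecOn with
  | nil => simp [pvSortFold]
  | append_singleton l x ih =>
    rw [List.foldl_append, ih, pvSortFold_append_singleton]
    have hsorted : ((pvSortFold l d).take n.toNat).Pairwise (pvRel d) :=
      (pvSortFold_pairwise l d).sublist (List.take_sublist _ _)
    rw [show (List.foldl (fun acc x => pvInsCapped acc x n d)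
          ((pvSortFold l d).take n.toNat) [x])
        = pvInsCapped ((pvSortFold l d).take n.toNat) x n d from rfl,
      pvInsCapped_eq_of_sorted _ x n d hsorted]
    set T := pvSortFold l d with hT
    set k := n.toNat with hkdef
    by_cases hTk : k ≤ T.length
    · have hlen : ((pvIns (T.take k) x d).length : Int) > n := by
        rw [pvIns_length]; simp only [List.length_take]; omega
      rw [if_pos hlen, List.dropLast_eq_take, pvIns_length]
      have h2 : (T.take k).length + 1 - 1 = k := by simp only [List.length_take]; omega
      rw [h2, pvIns_take]
    · have hTl : T.take k = T := List.take_of_length_le (by omega)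
      rw [hTl]
      have hlen : ¬ ((pvIns T x d).length : Int) > n := by
        rw [pvIns_length]; push_cast; omega
      rw [if_neg hlen]
      exact (List.take_of_length_le (by rw [pvIns_length]; omega)).symm

theorem pv_desc_eq_rev_asc (l : List Int) :
    PySem.List.sorted l (fun x => x) true = (PySem.List.sorted l (fun x => x) false).reverse := by
  refine List.Perm.eq_of_pairwise (le := fun a b : Int => b ≤ a)
    (fun a b _ _ h h' => le_antisymm h' h)
    (PySem.List.sorted_pairwise_rev l (fun x => x))
    ((List.pairwise_reverse).mpr (PySem.List.sorted_pairwise l (fun x => x))) ?_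
  exact (PySem.List.sorted_perm l _ true).trans
    ((List.reverse_perm _).trans (PySem.List.sorted_perm l _ false)).symm

-- ===== VERDICT (by name: the statement is the Claim_ definition above) =====
theorem sum_or_product_spec : Claim_equal_sum_or_product := by
  intro array n _ hpre
  have hn : 1 ≤ n := hpre
  unfold Spec_sum_or_product sum_or_product sum_or_product_alt
  set k := n.toNat with hkdef
  have hnk : n = (k : Int) := by omega
  have hk1 : 1 ≤ k := by omega
  have hB := PySem.List.foldl_prod_mk (f := fun acc x => pvInsCapped acc x n true)
      (g := fun acc x => pvInsCapped acc x n false) (l := array) (a := ([] : List Int)) (b := ([] : List Int))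
  have hslice1 : PySem.List.slice (PySem.List.sorted array (fun x => x) true) none (some n)
      = (PySem.List.sorted array (fun x => x) true).take k := by
    rw [hnk]; exact_mod_cast PySem.List.slice_to_natCast _ k
  have hslice2 : PySem.List.slice (PySem.List.sorted array (fun x => x) true) (some (-n)) none
      = (PySem.List.sorted array (fun x => x) true).drop
          ((PySem.List.sorted array (fun x => x) true).length - k) := by
    rw [hnk]; exact PySem.List.slice_from_neg_natCast _ k (by omega)
  have hprod : ((PySem.List.sorted array (fun x => x) true).drop
          ((PySem.List.sorted array (fun x => x) true).length - k)).foldl (fun p e => p * e) 1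
      = ((PySem.List.sorted array (fun x => x) false).take k).foldl (fun p v => p * v) 1 := by
    set asc := PySem.List.sorted array (fun x => x) false with hasc
    rw [pv_desc_eq_rev_asc]
    have hmink : asc.take (asc.length - (asc.reverse.length - k)) = asc.take k := by
      by_cases h : k ≤ asc.length
      · congr 1; simp; omega
      · rw [List.take_of_length_le (by simp; omega), List.take_of_length_le (by omega)]
    rw [List.drop_reverse, hmink]
    rw [← List.prod_eq_foldl, ← List.prod_eq_foldl, List.prod_reverse]
  simp only [hB, pvFold_capped array n hn true, pvFold_capped array n hn false,
    pvSortFold_eq_sorted_desc, pvSortFold_eq_sorted_asc, hslice1, hslice2, hprod, ← hkdef]
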